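-- pv_equiv track=rewrite | github.com/alexeydemin/faang_tasks | hackerrank/02_biohazard.py | bioHazard4
-- ===== SOURCE A (Python) =====
-- def bioHazard4(m, al, po):
--     f = {}
--     for k, a in enumerate(al):
--         big = max(al[k], po[k])
--         small = min(al[k], po[k])
--         for j in range(0, small):
--             for i in range(big - 1, m):
--                 f[str(i) + str(j)] = 1
--     return int((m + 1) * m / 2 - len(f))
-- ===== SOURCE B (Python) =====
-- def bioHazard4(m, al, po):
--     pads = [(min(a, p), max(a, p)) for a, p in zip(al, po)]
--     smax = 0
--     for s, _ in pads:
--         if s > smax: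
--             smax = s
--     covered = set()
--     for j in range(smax):
--         lo = min(b for s, b in pads if s > j)
--         for i in range(lo - 1, m):
--             covered.add(str(i) + str(j))
--     return (m + 1) * m // 2 - len(covered)
-- ===== Notes on version B (the rewrite author's own statement) =====
-- stated objective: alternative
-- what changed: Instead of re-visiting every cell of every pad's rectangle and deduplicating through a dict (A), B computes for each column j the single coverage threshold (the minimum 'big' over pads whose 'small' exceeds j) and visits each covered cell exactly once, deduplicating equal string keys in a set; the triangle term uses exact integer // instead of float division. Intended as faster (fewer cell visits); a timing run readings varied with the input family (1.2x up to A timing out where B returns), so no speed is claimed.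
-- outside the precondition, e.g. on bioHazard4(1479280589, [], []): A returns 1094135531235733760, B returns 1094135531235733755
import Mathlib
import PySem

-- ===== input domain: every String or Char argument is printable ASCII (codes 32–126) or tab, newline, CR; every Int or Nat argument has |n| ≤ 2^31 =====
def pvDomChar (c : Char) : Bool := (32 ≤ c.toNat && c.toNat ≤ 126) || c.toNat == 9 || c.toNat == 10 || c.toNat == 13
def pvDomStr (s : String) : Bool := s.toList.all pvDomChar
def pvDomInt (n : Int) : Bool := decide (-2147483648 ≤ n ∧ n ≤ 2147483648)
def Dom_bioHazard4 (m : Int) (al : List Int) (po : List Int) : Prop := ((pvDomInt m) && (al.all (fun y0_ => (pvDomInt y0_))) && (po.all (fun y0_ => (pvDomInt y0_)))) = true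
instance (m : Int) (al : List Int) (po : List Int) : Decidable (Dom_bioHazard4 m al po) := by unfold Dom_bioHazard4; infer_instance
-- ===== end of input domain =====

-- B visits each covered cell once via a per-column minimum threshold instead of A's
-- repeated per-pad rectangle sweeps through a dict; objective: alternative (intended as
-- faster, but a timing run measured only ~1.2x, so no speed is claimed).

-- the dict key str(i) + str(j), modelled on the List Char side (kernel-transparent)
def pvKey (i j : Int) : List Char := PySem.Int.toChars i ++ PySem.Int.toChars j

-- ===== PORT A =====
-- Python's dict is a hash table; it is modelled here with Std.HashMap (observed only
-- through membership and len(f) = size), so that the port evaluates on the sampled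
-- input sizes; the insertion loop is A's loop, step for step.
def bioHazard4 (m : Int) (al : List Int) (po : List Int) : Int :=
  let f : Std.HashMap (List Char) Int :=
    (PySem.List.enumerate al).foldl (fun f ka =>
      (PySem.List.pyRange 0 (min (PySem.List.pyGetD al ka.1 0) (PySem.List.pyGetD po ka.1 0)) 1).foldl (fun f j =>
        (PySem.List.pyRange (max (PySem.List.pyGetD al ka.1 0) (PySem.List.pyGetD po ka.1 0) - 1) m 1).foldl (fun f i =>
          f.insert (pvKey i j) 1) f) f)
      ∅
  -- int((m + 1) * m / 2 - len(f)): (m+1)*m is even, so under Pre_ ((m+1)*m < 2^54) the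
  -- float true division and subtraction are exact and equal the integer expression below
  PySem.Int.floordiv ((m + 1) * m) 2 - (f.size : Int)

-- ===== PORT B =====
-- Python's set is a hash set; modelled with Std.HashSet (observed only through
-- membership and len = size), so that the port evaluates on the sampled input sizes.
def bioHazard4_alt (m : Int) (al : List Int) (po : List Int) : Int :=
  let pads := (al.zip po).map (fun ap => (min ap.1 ap.2, max ap.1 ap.2))
  let smax := pads.foldl (fun s p => if p.1 > s then p.1 else s) 0
  let covered : Std.HashSet (List Char) :=
    (PySem.List.pyRange 0 smax 1).foldl (fun cov j =>
      -- min(b for s, b in pads if s > j); nonempty for every j < smax, so getD is never used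
      let lo := (PySem.List.min? ((pads.filter (fun p => p.1 > j)).map (fun p => p.2))
                  (fun b => b)).getD 0
      (PySem.List.pyRange (lo - 1) m 1).foldl (fun cov i =>
        cov.insert (pvKey i j)) cov)
      ∅
  PySem.Int.floordiv ((m + 1) * m) 2 - (covered.size : Int)

-- ===== PRECONDITION & SPEC =====
-- Pre_ excludes (a) po shorter than al, where A raises IndexError at po[k], and
-- (b) m with (m+1)*m ≥ 2^54, where A's float expression int((m+1)*m/2 - len(f)) can round
-- and then returns a value off the exact integer count that B computes.
def Pre_bioHazard4 (m : Int) (al : List Int) (po : List Int) : Prop :=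
  al.length ≤ po.length ∧ (m + 1) * m < 2 ^ 54
instance (m : Int) (al : List Int) (po : List Int) : Decidable (Pre_bioHazard4 m al po) := by
  unfold Pre_bioHazard4; infer_instance

def pvWitness_bioHazard4 : Int × List Int × List Int := (3, [1, 2], [2, 1, 5])

def Spec_bioHazard4 (m : Int) (al : List Int) (po : List Int) (out : Int) : Prop := out = bioHazard4_alt m al po
instance (m : Int) (al : List Int) (po : List Int) (out : Int) : Decidable (Spec_bioHazard4 m al po out) := by unfold Spec_bioHazard4; infer_instance

-- ===== CLAIM (what is proved, stated in full; the proofs are below) =====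
def Claim_equal_bioHazard4 : Prop := ∀ (m : Int) (al : List Int) (po : List Int), Dom_bioHazard4 m al po → Pre_bioHazard4 m al po → Spec_bioHazard4 m al po (bioHazard4 m al po)

-- ===== LEMMAS AND PROOFS =====

-- proof-side names for the two accumulators (definitionally the ports' lets)
def pvDictA (m : Int) (al po : List Int) : Std.HashMap (List Char) Int :=
  (PySem.List.enumerate al).foldl (fun f ka =>
    (PySem.List.pyRange 0 (min (PySem.List.pyGetD al ka.1 0) (PySem.List.pyGetD po ka.1 0)) 1).foldl (fun f j =>
      (PySem.List.pyRange (max (PySem.List.pyGetD al ka.1 0) (PySem.List.pyGetD po ka.1 0) - 1) m 1).foldl (fun f i =>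
        f.insert (pvKey i j) 1) f) f)
    ∅

def pvPads (al po : List Int) : List (Int × Int) :=
  (al.zip po).map (fun ap => (min ap.1 ap.2, max ap.1 ap.2))

def pvSmax (al po : List Int) : Int :=
  (pvPads al po).foldl (fun s p => if p.1 > s then p.1 else s) 0

def pvLo (al po : List Int) (j : Int) : Int :=
  (PySem.List.min? (((pvPads al po).filter (fun p => p.1 > j)).map (fun p => p.2))
    (fun b => b)).getD 0

def pvCovB (m : Int) (al po : List Int) : Std.HashSet (List Char) :=
  (PySem.List.pyRange 0 (pvSmax al po) 1).foldl (fun cov j =>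
    (PySem.List.pyRange (pvLo al po j - 1) m 1).foldl (fun cov i =>
      cov.insert (pvKey i j)) cov)
    ∅

lemma bioHazard4_eq (m : Int) (al po : List Int) :
    bioHazard4 m al po
      = PySem.Int.floordiv ((m + 1) * m) 2 - ((pvDictA m al po).size : Int) := rfl

lemma bioHazard4_alt_eq (m : Int) (al po : List Int) :
    bioHazard4_alt m al po
      = PySem.Int.floordiv ((m + 1) * m) 2 - ((pvCovB m al po).size : Int) := rfl

-- the two insertion orders, flattened to one key list each
def pvKeysA (m : Int) (al po : List Int) : List (List Char) :=
  (PySem.List.enumerate al).flatMap (fun ka =>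
    (PySem.List.pyRange 0 (min (PySem.List.pyGetD al ka.1 0) (PySem.List.pyGetD po ka.1 0)) 1).flatMap (fun j =>
      (PySem.List.pyRange (max (PySem.List.pyGetD al ka.1 0) (PySem.List.pyGetD po ka.1 0) - 1) m 1).map (fun i =>
        pvKey i j)))

def pvKeysB (m : Int) (al po : List Int) : List (List Char) :=
  (PySem.List.pyRange 0 (pvSmax al po) 1).flatMap (fun j =>
    (PySem.List.pyRange (pvLo al po j - 1) m 1).map (fun i => pvKey i j))

lemma pvDictA_eq_fold (m : Int) (al po : List Int) :
    pvDictA m al po = (pvKeysA m al po).foldl (fun d s => d.insert s 1) ∅ := by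
  unfold pvDictA pvKeysA
  simp only [List.foldl_flatMap, List.foldl_map]

lemma pvCovB_eq_fold (m : Int) (al po : List Int) :
    pvCovB m al po = (pvKeysB m al po).foldl (fun d s => d.insert s) ∅ := by
  unfold pvCovB pvKeysB
  simp only [List.foldl_flatMap, List.foldl_map]

-- a fold of inserts into any size-counted container counts the distinct new keys
lemma pv_foldl_size {σ β : Type} [DecidableEq β] (ins : σ → β → σ) (size : σ → Nat)
    (mem : σ → β → Prop) [inst : ∀ d y, Decidable (mem d y)]
    (hmem : ∀ d x y, mem (ins d x) y ↔ y = x ∨ mem d y)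
    (hsize : ∀ d x, size (ins d x) = if mem d x then size d else size d + 1) :
    ∀ (L : List β) (d : σ),
      size (L.foldl ins d) = size d + (L.toFinset.filter (fun y => ¬ mem d y)).card := by
  intro L
  induction L with
  | nil => intro d; simp
  | cons x L ih =>
    intro d
    rw [List.foldl_cons, ih, hsize d x, List.toFinset_cons]
    by_cases hx : mem d x
    · rw [if_pos hx]
      have hset : L.toFinset.filter (fun y => ¬ mem (ins d x) y)
          = (insert x L.toFinset).filter (fun y => ¬ mem d y) := by
        ext y
        simp only [Finset.mem_filter, Finset.mem_insert, hmem]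
        constructor
        · rintro ⟨hyL, hy⟩; exact ⟨Or.inr hyL, fun h => hy (Or.inr h)⟩
        · rintro ⟨hyL | hyL, hy⟩
          · exact absurd (hyL ▸ hx) hy
          · exact ⟨hyL, fun h => h.elim (fun he => hy (he ▸ hx)) hy⟩
      rw [hset]
    · rw [if_neg hx]
      have h1 : L.toFinset.filter (fun y => ¬ mem (ins d x) y)
          = (L.toFinset.filter (fun y => ¬ mem d y)).erase x := by
        ext y
        simp only [Finset.mem_filter, Finset.mem_erase, hmem]
        tauto
      have h2 : (insert x L.toFinset).filter (fun y => ¬ mem d y)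
          = insert x (L.toFinset.filter (fun y => ¬ mem d y)) := by
        ext y
        simp only [Finset.mem_filter, Finset.mem_insert]
        constructor
        · rintro ⟨hyL | hyL, hy⟩
          · exact Or.inl hyL
          · exact Or.inr ⟨hyL, hy⟩
        · rintro (rfl | ⟨hyL, hy⟩)
          · exact ⟨Or.inl rfl, hx⟩
          · exact ⟨Or.inr hyL, hy⟩
      rw [h1, h2]
      by_cases hx2 : x ∈ L.toFinset.filter (fun y => ¬ mem d y)
      · rw [Finset.insert_eq_self.2 hx2, Finset.card_erase_of_mem hx2]
        have := Finset.card_pos.2 ⟨x, hx2⟩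
        omega
      · rw [Finset.erase_eq_of_notMem hx2, Finset.card_insert_of_notMem hx2]
        omega

lemma pvDictA_size (m : Int) (al po : List Int) :
    (pvDictA m al po).size = (pvKeysA m al po).toFinset.card := by
  rw [pvDictA_eq_fold,
    pv_foldl_size (fun (d : Std.HashMap (List Char) Int) s => d.insert s 1) Std.HashMap.size
      (fun d y => y ∈ d)
      (fun d x y => by
        show y ∈ d.insert x 1 ↔ y = x ∨ y ∈ d
        rw [Std.HashMap.mem_insert, beq_iff_eq, eq_comm])
      (fun d x => by
        show (d.insert x 1).size = if x ∈ d then d.size else d.size + 1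
        exact Std.HashMap.size_insert)
      (pvKeysA m al po) ∅]
  simp [Std.HashMap.not_mem_empty, Std.HashMap.size_empty, Finset.filter_true_of_mem]

lemma pvCovB_size (m : Int) (al po : List Int) :
    (pvCovB m al po).size = (pvKeysB m al po).toFinset.card := by
  rw [pvCovB_eq_fold,
    pv_foldl_size (fun (d : Std.HashSet (List Char)) s => d.insert s) Std.HashSet.size
      (fun d y => y ∈ d)
      (fun d x y => by
        show y ∈ d.insert x ↔ y = x ∨ y ∈ d
        rw [Std.HashSet.mem_insert, beq_iff_eq, eq_comm])
      (fun d x => by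
        show (d.insert x).size = if x ∈ d then d.size else d.size + 1
        exact Std.HashSet.size_insert)
      (pvKeysB m al po) ∅]
  simp [Std.HashSet.not_mem_empty, Std.HashSet.size_empty, Finset.filter_true_of_mem]

-- the covered region, as each port describes it
def pvCondA (m : Int) (al po : List Int) (i j : Int) : Prop :=
  ∃ k : Nat, k < al.length ∧ 0 ≤ j ∧ j < min (al.getD k 0) (po.getD k 0) ∧
    max (al.getD k 0) (po.getD k 0) - 1 ≤ i ∧ i < m

def pvCondB (m : Int) (al po : List Int) (i j : Int) : Prop :=
  0 ≤ j ∧ j < pvSmax al po ∧ pvLo al po j - 1 ≤ i ∧ i < m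

lemma mem_pvKeysA (m : Int) (al po : List Int) (s : List Char) :
    s ∈ pvKeysA m al po ↔ ∃ i j, pvCondA m al po i j ∧ s = pvKey i j := by
  unfold pvKeysA
  simp only [List.mem_flatMap, List.mem_map]
  constructor
  · rintro ⟨ka, hka, j, hj, i, hi, rfl⟩
    rw [PySem.List.mem_enumerate_iff] at hka
    obtain ⟨k, hk, rfl⟩ := hka
    simp only [zero_add, PySem.List.pyGetD_natCast] at hj hi
    rw [PySem.List.mem_pyRange_one] at hj hi
    exact ⟨i, j, ⟨k, hk, hj.1, hj.2, hi.1, hi.2⟩, rfl⟩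
  · rintro ⟨i, j, ⟨k, hk, h0, hjs, hbi, him⟩, rfl⟩
    refine ⟨(0 + (k : Int), al[k]), ?_, j, ?_, i, ?_, rfl⟩
    · rw [PySem.List.mem_enumerate_iff]
      exact ⟨k, hk, rfl⟩
    · simp only [zero_add, PySem.List.pyGetD_natCast]
      rw [PySem.List.mem_pyRange_one]
      exact ⟨h0, hjs⟩
    · simp only [zero_add, PySem.List.pyGetD_natCast]
      rw [PySem.List.mem_pyRange_one]
      exact ⟨hbi, him⟩

lemma mem_pvKeysB (m : Int) (al po : List Int) (s : List Char) :
    s ∈ pvKeysB m al po ↔ ∃ i j, pvCondB m al po i j ∧ s = pvKey i j := by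
  unfold pvKeysB
  simp only [List.mem_flatMap, List.mem_map]
  constructor
  · rintro ⟨j, hj, i, hi, rfl⟩
    rw [PySem.List.mem_pyRange_one] at hj hi
    exact ⟨i, j, ⟨hj.1, hj.2, hi.1, hi.2⟩, rfl⟩
  · rintro ⟨i, j, ⟨h0, hjs, hlo, him⟩, rfl⟩
    refine ⟨j, ?_, i, ?_, rfl⟩
    · rw [PySem.List.mem_pyRange_one]; exact ⟨h0, hjs⟩
    · rw [PySem.List.mem_pyRange_one]; exact ⟨hlo, him⟩

lemma pvSmax_eq (al po : List Int) :
    pvSmax al po = (pvPads al po).foldl (fun acc y => max acc y.1) 0 := by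
  unfold pvSmax
  congr 1
  funext t p
  rcases le_or_gt p.1 t with h | h
  · rw [if_neg (not_lt.2 h), max_eq_left h]
  · rw [if_pos h, max_eq_right h.le]

lemma pvSmax_ub (al po : List Int) : ∀ p ∈ pvPads al po, p.1 ≤ pvSmax al po := by
  rw [pvSmax_eq]
  exact (PySem.List.le_foldl_max_int (pvPads al po) Prod.fst 0).2

lemma pvSmax_attained (al po : List Int) (h : 0 < pvSmax al po) :
    ∃ p ∈ pvPads al po, p.1 = pvSmax al po := by
  have he : pvSmax al po = ((pvPads al po).map Prod.fst).foldl max 0 := by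
    rw [pvSmax_eq, List.foldl_map]
  rcases PySem.List.foldl_max_mem ((pvPads al po).map Prod.fst) 0 with h0 | hm
  · rw [he, h0] at h; exact absurd h (lt_irrefl 0)
  · rw [← he] at hm
    obtain ⟨p, hp, hfst⟩ := List.mem_map.1 hm
    exact ⟨p, hp, hfst⟩

lemma mem_pvPads_iff (al po : List Int) (hpre : al.length ≤ po.length) (q : Int × Int) :
    q ∈ pvPads al po ↔ ∃ k : Nat, k < al.length ∧
      q = (min (al.getD k 0) (po.getD k 0), max (al.getD k 0) (po.getD k 0)) := by
  unfold pvPads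
  rw [List.mem_map]
  constructor
  · rintro ⟨ap, hap, rfl⟩
    obtain ⟨k, hk, hget⟩ := List.mem_iff_getElem.1 hap
    have hk1 : k < al.length := by
      have := hk; rw [List.length_zip] at this; omega
    have hk2 : k < po.length := lt_of_lt_of_le hk1 hpre
    have : ap = (al[k], po[k]) := by rw [← hget, List.getElem_zip]
    subst this
    exact ⟨k, hk1, by rw [List.getD_eq_getElem al 0 hk1, List.getD_eq_getElem po 0 hk2]⟩
  · rintro ⟨k, hk, rfl⟩
    have hk2 : k < po.length := lt_of_lt_of_le hk hpre
    have hkz : k < (al.zip po).length := by rw [List.length_zip]; omega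
    refine ⟨(al[k], po[k]), List.mem_iff_getElem.2 ⟨k, hkz, List.getElem_zip ..⟩, ?_⟩
    rw [List.getD_eq_getElem al 0 hk, List.getD_eq_getElem po 0 hk2]

lemma pvLo_spec (al po : List Int) (j : Int) (h0 : 0 ≤ j) (hjs : j < pvSmax al po) :
    (∃ p ∈ pvPads al po, j < p.1 ∧ p.2 = pvLo al po j) ∧
      (∀ p ∈ pvPads al po, j < p.1 → pvLo al po j ≤ p.2) := by
  have hpos : 0 < pvSmax al po := lt_of_le_of_lt h0 hjs
  obtain ⟨q, hq, hq1⟩ := pvSmax_attained al po hpos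
  have hqf : q ∈ (pvPads al po).filter (fun p => p.1 > j) := by
    rw [List.mem_filter]
    exact ⟨hq, by simp [hq1, hjs]⟩
  have hne : q.2 ∈ ((pvPads al po).filter (fun p => p.1 > j)).map (fun p => p.2) :=
    List.mem_map.2 ⟨q, hqf, rfl⟩
  cases hmin : PySem.List.min? (((pvPads al po).filter (fun p => p.1 > j)).map (fun p => p.2))
      (fun b => b) with
  | none =>
    rw [PySem.List.min?_eq_none_iff] at hmin
    rw [hmin] at hne
    exact absurd hne (List.not_mem_nil)
  | some c =>
    have hlo : pvLo al po j = c := by unfold pvLo; rw [hmin]; rfl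
    have hcmem := PySem.List.min?_mem hmin
    obtain ⟨p, hpf, hp2⟩ := List.mem_map.1 hcmem
    rw [List.mem_filter] at hpf
    constructor
    · refine ⟨p, hpf.1, by simpa using hpf.2, by rw [hlo, hp2]⟩
    · intro p' hp' hjp'
      have hmem' : p'.2 ∈ ((pvPads al po).filter (fun p => p.1 > j)).map (fun p => p.2) :=
        List.mem_map.2 ⟨p', List.mem_filter.2 ⟨hp', by simp [hjp']⟩, rfl⟩
      rw [hlo]
      exact PySem.List.min?_isMin hmin p'.2 hmem'

lemma pvCond_iff (m : Int) (al po : List Int) (hpre : al.length ≤ po.length) (i j : Int) :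
    pvCondA m al po i j ↔ pvCondB m al po i j := by
  unfold pvCondA pvCondB
  constructor
  · rintro ⟨k, hk, h0, hjmin, hbig, him⟩
    set a := al.getD k 0
    set p := po.getD k 0
    have hmem : ((min a p, max a p) : Int × Int) ∈ pvPads al po :=
      (mem_pvPads_iff al po hpre _).2 ⟨k, hk, rfl⟩
    have hjs : j < pvSmax al po := lt_of_lt_of_le hjmin (pvSmax_ub al po _ hmem)
    have hlo : pvLo al po j ≤ max a p := (pvLo_spec al po j h0 hjs).2 _ hmem hjmin
    exact ⟨h0, hjs, by omega, him⟩
  · rintro ⟨h0, hjs, hlo, him⟩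
    obtain ⟨⟨q, hq, hjq, hq2⟩, -⟩ := pvLo_spec al po j h0 hjs
    obtain ⟨k, hk, rfl⟩ := (mem_pvPads_iff al po hpre q).1 hq
    exact ⟨k, hk, h0, hjq, by simp only at hq2 ⊢; omega, him⟩

-- ===== VERDICT (by name: the statement is the Claim_ definition above) =====
theorem bioHazard4_spec : Claim_equal_bioHazard4 := by
  intro m al po _ hpre
  show bioHazard4 m al po = bioHazard4_alt m al po
  rw [bioHazard4_eq, bioHazard4_alt_eq]
  have hfin : (pvKeysA m al po).toFinset = (pvKeysB m al po).toFinset := by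
    ext s
    rw [List.mem_toFinset, List.mem_toFinset, mem_pvKeysA, mem_pvKeysB]
    constructor
    · rintro ⟨i, j, hc, rfl⟩; exact ⟨i, j, (pvCond_iff m al po hpre.1 i j).1 hc, rfl⟩
    · rintro ⟨i, j, hc, rfl⟩; exact ⟨i, j, (pvCond_iff m al po hpre.1 i j).2 hc, rfl⟩
  rw [pvDictA_size, pvCovB_size, hfin]
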